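-- pv_equiv track=rewrite | github.com/jarthurj/ThinkPython | 12-6.py | children_dictionary
-- ===== SOURCE A (Python) =====
-- def children_dictionary(d):
-- 	children = dict()
-- 	for x in d:
-- 		children[x] = []
-- 		for char_index in range(len(x)):
-- 			missing_a_char = x[0: char_index] + x[char_index + 1:]
-- 			if missing_a_char in d:
-- 				children[x].append(missing_a_char)
--
-- 	remove_empty_children(children)
-- 	return children
--
-- def remove_empty_children(d):
-- 	empty_child_list = []
-- 	for x in d:
-- 		if len(d[x]) == 0:
-- 			empty_child_list.append(x)
-- 	for y in empty_child_list:
-- 		del d[y]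
-- ===== SOURCE B (Python) =====
-- def children_dictionary(d):
--     def kids(pre, suf):
--         # recursive zipper over the word: pre = scanned prefix, suf = rest
--         if not suf:
--             return []
--         rest = kids(pre + suf[0], suf[1:])
--         c = pre + suf[1:]
--         return ([c] + rest) if c in d else rest
--
--     pairs = []
--     for x in d:
--         ks = kids('', x)
--         if ks:
--             pairs.append((x, ks))
--     return dict(pairs)
-- ===== Notes on version B (the rewrite author's own statement) =====
-- stated objective: alternative
-- what changed: Replaces A's mutable-dict build (index/range/slice inner loop plus a separate remove_empty_children prune pass) by pure back-to-front recursion: children of a word are generated by a recursive prefix/suffix zipper with no indexing, surviving pairs are assembled by structural recursion over the keys, and the result dict is constructed once at the end.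
import Mathlib
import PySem

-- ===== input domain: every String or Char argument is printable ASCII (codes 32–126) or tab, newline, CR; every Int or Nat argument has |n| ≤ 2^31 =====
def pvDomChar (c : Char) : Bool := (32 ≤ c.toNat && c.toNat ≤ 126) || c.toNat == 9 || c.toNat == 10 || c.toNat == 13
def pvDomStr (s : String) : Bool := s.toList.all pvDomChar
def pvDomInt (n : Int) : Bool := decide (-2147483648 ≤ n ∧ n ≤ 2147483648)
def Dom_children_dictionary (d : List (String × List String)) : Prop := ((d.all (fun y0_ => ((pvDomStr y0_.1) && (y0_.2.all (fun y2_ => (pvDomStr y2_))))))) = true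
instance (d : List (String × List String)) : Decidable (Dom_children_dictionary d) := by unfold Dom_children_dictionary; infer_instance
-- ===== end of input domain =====

-- B replaces A's mutable-dict build (index/range/slice inner loop plus the remove_empty_children
-- prune pass) by a prefix/suffix zipper recursion that generates each word's children without
-- indexing, a pairs list of the survivors, and one dict construction at the end (objective: alternative).


-- ===== PORT A =====
-- helper remove_empty_children, transliterated: collect keys with empty value lists, then delete them
def remove_empty_children (c : PySem.Dict String (List String)) : PySem.Dict String (List String) :=
  let empty_child_list :=
    c.keys.foldl (fun acc x => if (c.getD x []).length == 0 then acc ++ [x] else acc) []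
  empty_child_list.foldl (fun c2 y => c2.erase y) c

def children_dictionary (d : List (String × List String)) : List (String × List String) :=
  let children := d.foldl (fun c p =>
    let x := p.1
    let c1 := c.insert x ([] : List String)
    (PySem.List.pyRange 0 (PySem.Str.len x) 1).foldl (fun c2 ci =>
      -- missing_a_char = x[0:ci] + x[ci+1:]  (slices and the '+' taken on the List Char side, exact)
      let missing := String.ofList (PySem.Chars.slice x.toList (some 0) (some ci) ++
                                PySem.Chars.slice x.toList (some (ci + 1)) none)
      if d.any (fun q => q.1 == missing) then c2.modify x [] (fun l => l ++ [missing]) else c2) c1)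
    PySem.Dict.empty
  (remove_empty_children children).items

-- ===== PORT B =====
-- kids(pre, suf): recursive zipper over the word; 'c in d' is key membership
def kidsAlt (d : List (String × List String)) (pre suf : List Char) : List String :=
  match suf with
  | [] => []
  | ch :: t =>
      let rest := kidsAlt d (pre ++ [ch]) t
      let c := String.ofList (pre ++ t)
      if d.any (fun q => q.1 == c) then c :: rest else rest

-- pairs loop: collect the surviving (word, children) pairs, then dict(pairs)
def children_dictionary_alt (d : List (String × List String)) : List (String × List String) :=
  let pairs := d.foldl (fun acc p =>
    let ks := kidsAlt d [] p.1.toList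
    if ks.isEmpty then acc else acc ++ [(p.1, ks)]) []
  (PySem.Dict.ofList pairs).items

-- ===== PRECONDITION & SPEC =====
def Spec_children_dictionary (d : List (String × List String)) (out : List (String × List String)) : Prop := out = children_dictionary_alt d
instance (d : List (String × List String)) (out : List (String × List String)) : Decidable (Spec_children_dictionary d out) := by unfold Spec_children_dictionary; infer_instance

-- ===== CLAIM (what is proved, stated in full; the proofs are below) =====
def Claim_equal_children_dictionary : Prop := ∀ (d : List (String × List String)), Dom_children_dictionary d → Spec_children_dictionary d (children_dictionary d)

-- ===== LEMMAS AND PROOFS =====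

-- the one-char-deletion string at Int position i (A's spelling, x[:i] + x[i+1:])
def pvDel (x : String) (i : Int) : String :=
  String.ofList (PySem.Chars.slice x.toList none (some i) ++ PySem.Chars.slice x.toList (some (i + 1)) none)

-- the surviving children of x, A's order: filter the positions, then map the deletion
def pvKids (d : List (String × List String)) (x : String) : List String :=
  ((PySem.List.pyRange 0 (PySem.Str.len x) 1).filter
      (fun i => d.any (fun q => q.1 == pvDel x i))).map (pvDel x)

-- the deletion at Nat position j, list side
def pvDelAt (x : List Char) (j : Nat) : String :=
  String.ofList (x.take j ++ x.drop (j + 1))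

theorem pvDel_natCast (x : String) (j : Nat) : pvDel x (j : Int) = pvDelAt x.toList j := by
  have h1 : ((j : Int) + 1) = ((j + 1 : Nat) : Int) := by push_cast; ring
  rw [pvDel, pvDelAt, h1]
  simp only [PySem.Chars.slice]
  rw [PySem.List.slice_to_natCast, PySem.List.slice_from_natCast]

-- ===== A side =====

-- generic append-at-key loop: modifying key x n times from c.insert x v
theorem pvModifyFold (x : String) (P : Int → Bool) (m : Int → String) (l : List Int)
    (c : PySem.Dict String (List String)) (v : List String) :
    l.foldl (fun c2 ci => if P ci then c2.modify x [] (fun s => s ++ [m ci]) else c2) (c.insert x v)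
      = c.insert x (v ++ (l.filter P).map m) := by
  induction l generalizing v with
  | nil => simp
  | cons i l ih =>
      simp only [List.foldl_cons, List.filter_cons]
      by_cases h : P i
      · rw [if_pos h, if_pos h]
        have hstep : (c.insert x v).modify x [] (fun s => s ++ [m i]) = c.insert x (v ++ [m i]) := by
          simp only [PySem.Dict.modify, PySem.Dict.getD_insert_self, PySem.Dict.insert_insert_self]
        rw [hstep, ih (v ++ [m i])]
        simp
      · rw [if_neg h, if_neg h]
        exact ih v

-- A's inner loop, started from c.insert x [], appends exactly the surviving children
theorem pvInnerA (d : List (String × List String)) (x : String)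
    (l : List Int) (c : PySem.Dict String (List String)) :
    l.foldl (fun c2 ci =>
      let missing := String.ofList (PySem.Chars.slice x.toList (some 0) (some ci) ++
                                PySem.Chars.slice x.toList (some (ci + 1)) none)
      if d.any (fun q => q.1 == missing) then c2.modify x [] (fun s => s ++ [missing]) else c2)
      (c.insert x [])
    = c.insert x (((l.filter (fun i => d.any (fun q => q.1 == pvDel x i))).map (pvDel x))) := by
  have hme : ∀ i : Int, String.ofList (PySem.Chars.slice x.toList (some 0) (some i) ++
      PySem.Chars.slice x.toList (some (i + 1)) none) = pvDel x i := by
    intro i; simp [pvDel, PySem.List.slice_zero_start]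
  have h1 := pvModifyFold x
    (fun i => d.any (fun q => q.1 == String.ofList (PySem.Chars.slice x.toList (some 0) (some i) ++
      PySem.Chars.slice x.toList (some (i + 1)) none)))
    (fun i => String.ofList (PySem.Chars.slice x.toList (some 0) (some i) ++
      PySem.Chars.slice x.toList (some (i + 1)) none)) l c []
  refine h1.trans (congrArg (c.insert x) ?_)
  simp only [List.nil_append]
  rw [List.filter_congr (fun i _ => by rw [hme i]),
      List.map_congr_left (fun i _ => hme i)]

-- erasing a list of keys is filtering the items on those keys
theorem pvEraseFoldl (ys : List String) (c : PySem.Dict String (List String)) :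
    (ys.foldl (fun c2 y => c2.erase y) c).items
      = c.items.filter (fun p => decide (p.1 ∉ ys)) := by
  induction ys generalizing c with
  | nil => simp
  | cons y ys ih =>
      rw [List.foldl_cons, ih]
      simp only [PySem.Dict.erase, List.filter_filter]
      apply List.filter_congr
      intro p _
      by_cases h : p.1 = y <;> simp [h]

theorem pvContains_iff (c : PySem.Dict String (List String)) (x : String) :
    c.contains x = true ↔ x ∈ c.items.map (·.1) := by
  rw [PySem.Dict.contains_iff_mem_keys]
  rfl

-- remove_empty_children on a dict whose values are determined by pvKids is the non-empty filter
theorem pvRemoveEmpty (d : List (String × List String)) (c : PySem.Dict String (List String))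
    (hval : ∀ p ∈ c.items, p.2 = pvKids d p.1) :
    (remove_empty_children c).items = c.items.filter (fun p => !p.2.isEmpty) := by
  unfold remove_empty_children
  rw [PySem.List.foldl_append_if, pvEraseFoldl]
  simp only [List.nil_append, List.map_id']
  apply List.filter_congr
  intro p hp
  have hkeys : p.1 ∈ c.keys := List.mem_map.mpr ⟨p, hp, rfl⟩
  have hgetD : c.getD p.1 [] = pvKids d p.1 := by
    have hcont : c.contains p.1 = true := (pvContains_iff c p.1).mpr hkeys
    rw [PySem.Dict.contains_eq_isSome_get?] at hcont
    rcases Option.isSome_iff_exists.mp hcont with ⟨v, hv⟩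
    rw [PySem.Dict.getD_eq_get?_getD, hv]
    exact hval _ (PySem.Dict.mem_items_of_get?_eq_some c hv)
  have hiff : p.1 ∈ c.keys.filter (fun x => (c.getD x []).length == 0) ↔ p.2 = [] := by
    constructor
    · intro h
      have hlen := (List.mem_filter.mp h).2
      rw [hgetD] at hlen
      rw [hval p hp]
      exact List.eq_nil_of_length_eq_zero (by simpa using hlen)
    · intro h
      refine List.mem_filter.mpr ⟨hkeys, ?_⟩
      rw [hgetD, ← hval p hp, h]
      rfl
  by_cases h2 : p.2 = []
  · have h3 := hiff.mpr h2
    rw [h2]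
    simp only [List.isEmpty_nil, Bool.not_true]
    exact decide_eq_false (not_not_intro h3)
  · have h3 : p.1 ∉ c.keys.filter (fun x => (c.getD x []).length == 0) :=
      fun hm => h2 (hiff.mp hm)
    rw [decide_eq_true h3]
    cases hp2 : p.2 with
    | nil => exact absurd hp2 h2
    | cons a t => simp

-- ===== fold-into-dict characterisation (shared by both sides) =====

-- values along a (key, value)-insert loop stay determined by the key
theorem pvItemsVal (v : String → List String) (l : List (String × List String))
    (c : PySem.Dict String (List String))
    (hc : ∀ p ∈ c.items, p.2 = v p.1) (hl : ∀ p ∈ l, p.2 = v p.1) :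
    ∀ p ∈ (l.foldl (fun c q => c.insert q.1 q.2) c).items, p.2 = v p.1 := by
  induction l generalizing c with
  | nil => exact hc
  | cons q t ih =>
      simp only [List.foldl_cons]
      refine ih _ ?_ (fun p hp => hl p (List.mem_cons_of_mem _ hp))
      intro p hp
      rcases (PySem.Dict.mem_items_insert c q.1 q.2 p).mp hp with h | ⟨h, _⟩
      · rw [h]; exact hl q (List.mem_cons_self ..)
      · exact hc p h

-- the items of the insert loop: first-occurrence keys, values by v
theorem pvFoldItems (v : String → List String) (l : List (String × List String))
    (hl : ∀ p ∈ l, p.2 = v p.1) :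
    (l.foldl (fun c q => c.insert q.1 q.2) PySem.Dict.empty).items
      = (PySem.Set.ofList (l.map (·.1))).map (fun x => (x, v x)) := by
  set D := l.foldl (fun c q => c.insert q.1 q.2) PySem.Dict.empty with hD
  have hkeys : D.keys = PySem.Set.ofList (l.map (·.1)) := by
    rw [hD, PySem.Dict.keys_foldl_insert_key l Prod.fst (fun _ q => q.2)]
    simp [PySem.Dict.keys_empty, PySem.Set.update, PySem.Set.ofList]
  have hnd : D.keys.Nodup := by
    rw [hD]
    exact PySem.Dict.nodup_keys_foldl_insert_key l Prod.fst (fun _ q => q.2) _ (by simp)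
  have hval := pvItemsVal v l PySem.Dict.empty
    (by intro p hp; simp [PySem.Dict.empty] at hp) hl
  rw [PySem.Dict.items_eq_map_keys D hnd [], hkeys]
  apply List.map_congr_left
  intro x hx
  have hx' : x ∈ D.keys := by rw [hkeys]; exact hx
  rcases List.mem_map.mp hx' with ⟨p, hp, hp1⟩
  have h2 := hval p hp
  have : D.getD x [] = p.2 := by
    rw [← hp1]
    exact PySem.Dict.getD_of_mem_items D (by exact (Prod.mk.eta (p := p)) ▸ hp) hnd []
  rw [this, h2, hp1]

-- Set.ofList commutes with a filter on the elements
theorem pvOfListFilter (p : String → Bool) (l : List String) :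
    PySem.Set.ofList (l.filter p) = (PySem.Set.ofList l).filter p := by
  suffices h : ∀ (l : List String) (s : PySem.Set String),
      (l.filter p).foldl PySem.Set.add (s.filter p) = (l.foldl PySem.Set.add s).filter p by
    simpa [PySem.Set.ofList, PySem.Set.empty] using h l []
  intro l
  induction l with
  | nil => intro s; rfl
  | cons x t ih =>
      intro s
      have hadd : (PySem.Set.add s x).filter p
          = if p x then PySem.Set.add (s.filter p) x else s.filter p := by
        by_cases hx : p x
        · rw [if_pos hx]
          by_cases hm : x ∈ s
          · simp [PySem.Set.add, PySem.Set.contains, hm, hx, List.mem_filter]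
          · simp [PySem.Set.add, PySem.Set.contains, hm, hx, List.mem_filter, List.filter_append]
        · rw [if_neg hx]
          by_cases hm : x ∈ s
          · simp [PySem.Set.add, PySem.Set.contains, hm]
          · simp [PySem.Set.add, PySem.Set.contains, hm, List.filter_append, hx]
      by_cases hx : p x
      · simp only [List.filter_cons, hx, if_pos, List.foldl_cons]
        rw [← ih (PySem.Set.add s x), hadd, if_pos hx]
      · simp only [List.filter_cons, hx, List.foldl_cons]
        rw [← ih (PySem.Set.add s x), hadd, if_neg hx]
        simp

-- ===== B side =====

theorem pvDelAt_head (pre : List Char) (ch : Char) (t : List Char) :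
    pvDelAt (pre ++ ch :: t) pre.length = String.ofList (pre ++ t) := by
  rw [pvDelAt, List.take_left]
  have : (pre ++ ch :: t).drop (pre.length + 1) = t := by
    rw [← List.drop_drop, List.drop_left]
    rfl
  rw [this]

-- the zipper equals filter-then-map over the positions of the full word
theorem pvKidsAlt_eq (d : List (String × List String)) (pre suf : List Char) :
    kidsAlt d pre suf
      = ((List.range suf.length).filter
            (fun j => d.any (fun q => q.1 == pvDelAt (pre ++ suf) (pre.length + j)))).map
          (fun j => pvDelAt (pre ++ suf) (pre.length + j)) := by
  induction suf generalizing pre with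
  | nil => rfl
  | cons ch t ih =>
      have hshift : ∀ j : Nat, pvDelAt (pre ++ ch :: t) (pre.length + (j + 1))
          = pvDelAt ((pre ++ [ch]) ++ t) ((pre ++ [ch]).length + j) := by
        intro j
        rw [List.append_assoc, List.singleton_append, List.length_append,
            List.length_singleton]
        ring_nf
      rw [kidsAlt, ih (pre ++ [ch])]
      have hshift' : ∀ j : Nat, pvDelAt (pre ++ [ch] ++ t) ((pre ++ [ch]).length + j)
          = pvDelAt (pre ++ ch :: t) (pre.length + (j + 1)) := fun j => (hshift j).symm
      simp only [List.length_cons, List.range_succ_eq_map, List.filter_cons, List.filter_map,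
        Nat.add_zero, pvDelAt_head, hshift']
      have hmf : List.map (fun j => pvDelAt (pre ++ ch :: t) (pre.length + (j + 1)))
            (List.filter (fun j => d.any fun q => q.1 == pvDelAt (pre ++ ch :: t) (pre.length + (j + 1)))
              (List.range t.length))
          = List.map (fun j => pvDelAt (pre ++ ch :: t) (pre.length + j))
            (List.map Nat.succ
              (List.filter ((fun j => d.any fun q => q.1 == pvDelAt (pre ++ ch :: t) (pre.length + j)) ∘ Nat.succ)
                (List.range t.length))) := by
        rw [List.map_map]
        rfl
      split_ifs with h
      · simp only [List.map_cons, Nat.add_zero, pvDelAt_head]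
        rw [hmf]
      · exact hmf

-- B's zipper computes exactly A's surviving-children list
theorem pvKids_eq_kidsAlt (d : List (String × List String)) (x : String) :
    pvKids d x = kidsAlt d [] x.toList := by
  rw [pvKidsAlt_eq d [] x.toList]
  simp only [List.nil_append, List.length_nil, Nat.zero_add]
  rw [pvKids, PySem.Str.len_eq, PySem.List.pyRange_zero_natCast]
  simp only [List.filter_map]
  have hfun1 : ((fun i => d.any fun q => q.1 == pvDel x i) ∘ fun k : Nat => ((k : Nat) : Int))
      = (fun j : Nat => d.any fun q => q.1 == pvDelAt x.toList j) :=
    funext fun j => by simp [Function.comp_apply, pvDel_natCast]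
  have hfun2 : (pvDel x ∘ fun k : Nat => ((k : Nat) : Int)) = (fun j : Nat => pvDelAt x.toList j) :=
    funext fun j => by simp [Function.comp_apply, pvDel_natCast]
  rw [hfun1, List.map_map, hfun2]

-- the pairs loop collects the filtered, value-tagged key list
theorem pvBuildAlt_eq (d : List (String × List String)) :
    d.foldl (fun acc p =>
        let ks := kidsAlt d [] p.1.toList
        if ks.isEmpty then acc else acc ++ [(p.1, ks)]) []
      = (d.filter (fun p => !(pvKids d p.1).isEmpty)).map (fun p => (p.1, pvKids d p.1)) := by
  have hcong : ∀ (acc : List (String × List String)), ∀ p ∈ d,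
      (let ks := kidsAlt d [] p.1.toList
       if ks.isEmpty then acc else acc ++ [(p.1, ks)])
      = (if !(pvKids d p.1).isEmpty then acc ++ [(p.1, pvKids d p.1)] else acc) := by
    intro acc p _
    simp only [← pvKids_eq_kidsAlt]
    by_cases h : (pvKids d p.1).isEmpty
    · simp [h]
    · simp [h]
  rw [PySem.List.foldl_congr_mem d _ _ [] hcong, PySem.List.foldl_append_if]
  simp

-- A's outer loop: first-occurrence keys, all values pvKids
theorem pvAItems (d : List (String × List String)) :
    (d.foldl (fun c p =>
        let x := p.1
        let c1 := c.insert x ([] : List String)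
        (PySem.List.pyRange 0 (PySem.Str.len x) 1).foldl (fun c2 ci =>
          let missing := String.ofList (PySem.Chars.slice x.toList (some 0) (some ci) ++
                                    PySem.Chars.slice x.toList (some (ci + 1)) none)
          if d.any (fun q => q.1 == missing) then c2.modify x [] (fun l => l ++ [missing]) else c2) c1)
      PySem.Dict.empty).items
    = (PySem.Set.ofList (d.map (·.1))).map (fun x => (x, pvKids d x)) := by
  have hstep : ∀ (c : PySem.Dict String (List String)) (p : String × List String),
      (let x := p.1
       let c1 := c.insert x ([] : List String)
       (PySem.List.pyRange 0 (PySem.Str.len x) 1).foldl (fun c2 ci =>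
         let missing := String.ofList (PySem.Chars.slice x.toList (some 0) (some ci) ++
                                   PySem.Chars.slice x.toList (some (ci + 1)) none)
         if d.any (fun q => q.1 == missing) then c2.modify x [] (fun l => l ++ [missing]) else c2) c1)
      = c.insert p.1 (pvKids d p.1) := by
    intro c p
    exact pvInnerA d p.1 (PySem.List.pyRange 0 (PySem.Str.len p.1) 1) c
  have h1 := PySem.List.foldl_congr_mem d _
    (fun c (p : String × List String) => c.insert p.1 (pvKids d p.1)) PySem.Dict.empty
    (fun c p _ => hstep c p)
  have h2 : d.foldl (fun c (p : String × List String) => c.insert p.1 (pvKids d p.1)) PySem.Dict.empty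
      = (d.map (fun p => (p.1, pvKids d p.1))).foldl (fun c q => c.insert q.1 q.2) PySem.Dict.empty :=
    (List.foldl_map (f := fun p : String × List String => (p.1, pvKids d p.1))
      (g := fun (c : PySem.Dict String (List String)) q => c.insert q.1 q.2)).symm
  rw [h1, h2, pvFoldItems (pvKids d) _ (by
    intro p hp
    obtain ⟨a, ha, rfl⟩ := List.mem_map.mp hp
    rfl)]
  simp only [List.map_map]
  rfl

-- ===== VERDICT (by name: the statement is the Claim_ definition above) =====
theorem children_dictionary_spec : Claim_equal_children_dictionary := by
  intro d _
  unfold Spec_children_dictionary children_dictionary children_dictionary_alt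
  have hitems := pvAItems d
  have hval : ∀ p ∈ (d.foldl (fun c p =>
      let x := p.1
      let c1 := c.insert x ([] : List String)
      (PySem.List.pyRange 0 (PySem.Str.len x) 1).foldl (fun c2 ci =>
        let missing := String.ofList (PySem.Chars.slice x.toList (some 0) (some ci) ++
                                  PySem.Chars.slice x.toList (some (ci + 1)) none)
        if d.any (fun q => q.1 == missing) then c2.modify x [] (fun l => l ++ [missing]) else c2) c1)
      PySem.Dict.empty).items, p.2 = pvKids d p.1 := by
    intro p hp
    rw [hitems] at hp
    obtain ⟨x, hx, rfl⟩ := List.mem_map.mp hp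
    rfl
  rw [pvRemoveEmpty d _ hval, hitems, List.filter_map]
  have hlB : ∀ p ∈ d.foldl (fun acc p =>
      let ks := kidsAlt d [] p.1.toList
      if ks.isEmpty then acc else acc ++ [(p.1, ks)]) [], p.2 = pvKids d p.1 := by
    intro p hp
    rw [pvBuildAlt_eq] at hp
    obtain ⟨a, ha, rfl⟩ := List.mem_map.mp hp
    rfl
  simp only [PySem.Dict.ofList, PySem.Dict.update]
  rw [pvFoldItems (pvKids d) _ hlB, pvBuildAlt_eq, List.map_map]
  have hkeys : List.map ((fun x => x.1) ∘ fun p : String × List String => (p.1, pvKids d p.1))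
        (List.filter (fun p => !(pvKids d p.1).isEmpty) d)
      = List.filter (fun x => !(pvKids d x).isEmpty) (List.map (fun p => p.1) d) := by
    rw [List.filter_map]
    rfl
  rw [hkeys, pvOfListFilter]
  rfl
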